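-- pv_equiv track=rewrite | github.com/jheikkila42/sea_watch | sea_watch_17.py | choose_continuous_night_workers
-- ===== SOURCE A (Python) =====
-- def choose_continuous_night_workers(prev_day_daymen_work):
--     """
--     Valitse jatkuvan yön tekijät:
--     - early_worker: se dayman, joka teki edellisen päivän viimeisen iltaslotin
--     - late_worker: ensisijaisesti Dayman PH2
--     """
--     daymen = ['Dayman EU', 'Dayman PH1', 'Dayman PH2']
--
--     latest_worker = None
--     latest_slot = -1
--     for dm in daymen:
--         work = prev_day_daymen_work.get(dm, [False] * 48)
--         for slot in range(47, -1, -1):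
--             if work[slot]:
--                 if slot > latest_slot:
--                     latest_slot = slot
--                     latest_worker = dm
--                 break
--
--     early_worker = latest_worker or 'Dayman EU'
--     late_worker = 'Dayman PH2'
--     if late_worker == early_worker:
--         late_worker = 'Dayman PH1'
--
--     return early_worker, late_worker
-- ===== SOURCE B (Python) =====
-- def choose_continuous_night_workers(prev_day_daymen_work):
--     """Build a table of each dayman's last worked slot, then pick by a single max."""
--     daymen = ['Dayman EU', 'Dayman PH1', 'Dayman PH2']
--     slots = []
--     for dm in daymen:
--         last = -1
--         for s, worked in enumerate(prev_day_daymen_work.get(dm, [])[:48]):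
--             if worked:
--                 last = s
--         slots.append(last)
--     early_worker = daymen[slots.index(max(slots))]
--     late_worker = 'Dayman PH1' if early_worker == 'Dayman PH2' else 'Dayman PH2'
--     return early_worker, late_worker
-- ===== Notes on version B (the rewrite author's own statement) =====
-- stated objective: alternative
-- what changed: A's single running best-so-far scan with a backward inner loop and break is replaced by building a table of each dayman's last worked slot via one forward pass over work[:48], then selecting the early worker with a single max/index pick.
-- crash fix: On inputs where one of the three dayman keys maps to a schedule shorter than 48 slots, A raises IndexError (it reads work[47] first); B returns the workers chosen from the slots that exist. — e.g. on choose_continuous_night_workers([("Dayman PH1", [true])]): A raises IndexError, B returns ("Dayman PH1", "Dayman PH2")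
import Mathlib
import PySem

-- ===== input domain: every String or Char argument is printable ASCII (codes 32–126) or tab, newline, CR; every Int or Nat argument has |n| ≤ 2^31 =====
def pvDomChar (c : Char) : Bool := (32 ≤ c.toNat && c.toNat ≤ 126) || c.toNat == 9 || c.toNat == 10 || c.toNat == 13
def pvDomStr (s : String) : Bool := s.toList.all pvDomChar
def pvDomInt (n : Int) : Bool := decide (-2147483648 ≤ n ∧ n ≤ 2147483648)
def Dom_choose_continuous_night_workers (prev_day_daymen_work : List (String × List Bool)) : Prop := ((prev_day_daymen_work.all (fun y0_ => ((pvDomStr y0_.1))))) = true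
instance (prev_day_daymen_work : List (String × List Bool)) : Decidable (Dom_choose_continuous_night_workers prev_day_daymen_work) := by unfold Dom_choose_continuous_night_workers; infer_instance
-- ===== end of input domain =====

-- B replaces A's running best-so-far scan (backward inner loop with break) by a table of
-- last-worked slots built by one forward pass per dayman and a single max/index pick;
-- objective: alternative decomposition, same cost.

def pvDaymen : List String := ["Dayman EU", "Dayman PH1", "Dayman PH2"]

-- ===== PORT A =====
-- inner 'for slot in range(47,-1,-1): if work[slot]: … break' — first slot of the countdown
-- with work[slot] truthy (indexing is exact under Pre_, which rules out the IndexError inputs)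
def pvFindBreakA (work : List Bool) : List Int → Option Int
  | [] => none
  | s :: rest => if PySem.List.pyGetD work s false then some s else pvFindBreakA work rest

-- the 'if slot > latest_slot: …' update after the break (the loop body's tail)
def pvStepA (st : Option String × Int) (found : Option Int) (dm : String) : Option String × Int :=
  match found with
  | some slot => if st.2 < slot then (some dm, slot) else st
  | none => st

def choose_continuous_night_workers (prev_day_daymen_work : List (String × List Bool)) : String × String :=
  let st := pvDaymen.foldl (fun (st : Option String × Int) dm =>
      let work := PySem.Dict.getD (PySem.Dict.mk prev_day_daymen_work) dm (List.replicate 48 false)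
      pvStepA st (pvFindBreakA work (PySem.List.pyRange 47 (-1) (-1))) dm) (none, -1)
  let early := st.1.getD "Dayman EU"   -- 'latest_worker or "Dayman EU"': the names are nonempty strings
  let late := if "Dayman PH2" = early then "Dayman PH1" else "Dayman PH2"
  (early, late)

-- ===== PORT B =====
-- last worked slot of work[:48], forward pass (Source B's last_true)
def pvLastTrue (work : List Bool) : Int :=
  (PySem.List.enumerate (PySem.List.slice work none (some 48))).foldl
    (fun last sv => if sv.2 then sv.1 else last) (-1)

-- daymen[slots.index(max(slots))]: max(slots) is the first maximal value, .index its first position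
def pvPick (slots : List Int) : String :=
  match PySem.List.max? slots (fun x => x) with
  | some m =>
    match PySem.List.index? slots m with
    | some i => (PySem.List.pyGet? pvDaymen (i : Int)).getD "Dayman EU"   -- i < len(daymen) always
    | none => "Dayman EU"                              -- unreachable: m ∈ slots
  | none => "Dayman EU"                                -- unreachable: slots is never empty

def choose_continuous_night_workers_alt (prev_day_daymen_work : List (String × List Bool)) : String × String :=
  let slots := pvDaymen.foldl (fun acc dm =>
      acc ++ [pvLastTrue (PySem.Dict.getD (PySem.Dict.mk prev_day_daymen_work) dm [])]) []
  let early := pvPick slots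
  let late := if early = "Dayman PH2" then "Dayman PH1" else "Dayman PH2"
  (early, late)

-- ===== PRECONDITION & SPEC =====
-- Pre_ excludes exactly the inputs where A raises IndexError: a schedule stored under one of the
-- three dayman names that is shorter than 48 slots (work[47] is read first).
def Pre_choose_continuous_night_workers (prev_day_daymen_work : List (String × List Bool)) : Prop :=
  ∀ dm ∈ pvDaymen, 48 ≤ (PySem.Dict.getD (PySem.Dict.mk prev_day_daymen_work) dm (List.replicate 48 false)).length
instance (prev_day_daymen_work : List (String × List Bool)) : Decidable (Pre_choose_continuous_night_workers prev_day_daymen_work) := by unfold Pre_choose_continuous_night_workers; infer_instance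
def pvWitness_choose_continuous_night_workers : (List (String × List Bool)) :=
  [("Dayman PH2", List.replicate 47 false ++ [true])]

-- On inputs where some of the three dayman keys maps to a list shorter than 48 slots, A raises
-- IndexError (it reads work[47] first); B returns the workers chosen from the slots that exist
-- (proved at the bottom as choose_continuous_night_workers_raises).
def Raises_choose_continuous_night_workers (prev_day_daymen_work : List (String × List Bool)) : Prop :=
  ∃ dm ∈ pvDaymen, (PySem.Dict.getD (PySem.Dict.mk prev_day_daymen_work) dm (List.replicate 48 false)).length < 48
instance (prev_day_daymen_work : List (String × List Bool)) : Decidable (Raises_choose_continuous_night_workers prev_day_daymen_work) := by unfold Raises_choose_continuous_night_workers; infer_instance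
def pvRaiseWitness_choose_continuous_night_workers : (List (String × List Bool)) := [("Dayman PH1", [true])]
def pvRaiseWitnessOut_choose_continuous_night_workers : String × String := ("Dayman PH1", "Dayman PH2")

def Spec_choose_continuous_night_workers (prev_day_daymen_work : List (String × List Bool)) (out : String × String) : Prop := out = choose_continuous_night_workers_alt prev_day_daymen_work
instance (prev_day_daymen_work : List (String × List Bool)) (out : String × String) : Decidable (Spec_choose_continuous_night_workers prev_day_daymen_work out) := by unfold Spec_choose_continuous_night_workers; infer_instance

-- ===== CLAIM (what is proved, stated in full; the proofs are below) =====
def Claim_equal_choose_continuous_night_workers : Prop := ∀ (prev_day_daymen_work : List (String × List Bool)), Dom_choose_continuous_night_workers prev_day_daymen_work → Pre_choose_continuous_night_workers prev_day_daymen_work → Spec_choose_continuous_night_workers prev_day_daymen_work (choose_continuous_night_workers prev_day_daymen_work)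
def Claim_raises_choose_continuous_night_workers : Prop := (∀ (prev_day_daymen_work : List (String × List Bool)), Dom_choose_continuous_night_workers prev_day_daymen_work → Raises_choose_continuous_night_workers prev_day_daymen_work → ¬ Pre_choose_continuous_night_workers prev_day_daymen_work) ∧ (Dom_choose_continuous_night_workers (pvRaiseWitness_choose_continuous_night_workers) ∧ Raises_choose_continuous_night_workers (pvRaiseWitness_choose_continuous_night_workers) ∧ choose_continuous_night_workers_alt (pvRaiseWitness_choose_continuous_night_workers) = pvRaiseWitnessOut_choose_continuous_night_workers)

-- ===== LEMMAS AND PROOFS =====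

-- forward fold of Source B, on an arbitrary list
def pvFwd (l : List Bool) : Int :=
  (PySem.List.enumerate l).foldl (fun last sv => if sv.2 then sv.1 else last) (-1)

theorem pvLastTrue_eq_fwd (work : List Bool) : pvLastTrue work = pvFwd (work.take 48) := by
  unfold pvLastTrue pvFwd
  rw [PySem.List.slice_to work (by norm_num)]
  rfl

theorem pvEnum_snoc (l : List Bool) (x : Bool) : ∀ s : Int,
    PySem.List.enumerate (l ++ [x]) s = PySem.List.enumerate l s ++ [(s + l.length, x)] := by
  induction l with
  | nil => intro s; simp [PySem.List.enumerate_nil, PySem.List.enumerate_cons]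
  | cons b t ih =>
    intro s
    simp [PySem.List.enumerate_cons, ih]
    omega

theorem pvFwd_snoc (l : List Bool) (x : Bool) :
    pvFwd (l ++ [x]) = if x then (l.length : Int) else pvFwd l := by
  unfold pvFwd
  rw [pvEnum_snoc, List.foldl_append]
  simp

theorem pvFwd_ge (l : List Bool) : -1 ≤ pvFwd l := by
  induction l using List.reverseRecOn with
  | nil => simp [pvFwd, PySem.List.enumerate_nil]
  | append_singleton t x ih =>
    rw [pvFwd_snoc]
    split_ifs <;> omega

theorem pvScan_eq (work : List Bool) : ∀ n : Nat, n ≤ work.length →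
    pvFindBreakA work (PySem.List.pyRange ((n : Int) - 1) (-1) (-1)) =
      (if pvFwd (work.take n) < 0 then none else some (pvFwd (work.take n))) := by
  intro n
  induction n with
  | zero =>
    intro _
    rw [PySem.List.pyRange_neg_one_eq_nil (by omega)]
    simp [pvFindBreakA, pvFwd, PySem.List.enumerate_nil]
  | succ n ih =>
    intro h
    have hn : n < work.length := by omega
    have hc : ((n + 1 : Nat) : Int) - 1 = (n : Int) := by push_cast; ring
    rw [hc]
    rw [PySem.List.pyRange_neg_one_cons (by omega)]
    have htake : work.take (n + 1) = work.take n ++ [work[n]] := by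
      rw [List.take_add_one]
      simp [List.getElem?_eq_getElem hn]
    have hget : PySem.List.pyGetD work (n : Int) false = work[n] := by
      rw [PySem.List.pyGetD_natCast]
      exact List.getD_eq_getElem work false hn
    have hlen : ((work.take n).length : Int) = (n : Int) := by
      simp [List.length_take]
      omega
    rw [pvFindBreakA, hget, htake, pvFwd_snoc, hlen]
    by_cases hb : work[n] = true
    · simp [hb]
    · simp at hb
      simp [hb]
      exact ih (by omega)

-- the per-dayman core: A's backward break-scan agrees with B's forward last-true table entry
theorem pvInner_eq (work : List Bool) (h : 48 ≤ work.length) :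
    pvFindBreakA work (PySem.List.pyRange 47 (-1) (-1)) =
      (if pvLastTrue work < 0 then none else some (pvLastTrue work)) := by
  have := pvScan_eq work 48 h
  rw [pvLastTrue_eq_fwd]
  norm_num at this
  exact this

theorem pvLastTrue_nil : pvLastTrue ([] : List Bool) = -1 := by decide

theorem pvInner_default :
    pvFindBreakA (List.replicate 48 false) (PySem.List.pyRange 47 (-1) (-1)) = none := by decide

theorem pvLastTrue_ge (work : List Bool) : -1 ≤ pvLastTrue work := by
  rw [pvLastTrue_eq_fwd]; exact pvFwd_ge _

theorem pvIdx0 (a b c : Int) : PySem.List.index? [a, b, c] a = some 0 :=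
  PySem.List.index?_cons_self a [b, c]

theorem pvIdx1 (a b c : Int) (h : a ≠ b) : PySem.List.index? [a, b, c] b = some 1 := by
  rw [PySem.List.index?_cons_of_ne [b, c] h, PySem.List.index?_cons_self]
  rfl

theorem pvIdx2 (a b c : Int) (h1 : a ≠ c) (h2 : b ≠ c) : PySem.List.index? [a, b, c] c = some 2 := by
  rw [PySem.List.index?_cons_of_ne [b, c] h1, PySem.List.index?_cons_of_ne [c] h2,
      PySem.List.index?_cons_self]
  rfl

theorem pvPick_eq (l1 l2 l3 : Int) :
    pvPick [l1, l2, l3] =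
      if l1 < l3 ∧ l2 < l3 then "Dayman PH2" else if l1 < l2 then "Dayman PH1" else "Dayman EU" := by
  unfold pvPick
  simp only [PySem.List.max?, List.foldl]
  by_cases h12 : l1 < l2
  · simp only [if_pos h12]
    by_cases h23 : l2 < l3
    · simp only [if_pos h23, pvIdx2 l1 l2 l3 (by omega) (by omega)]
      rw [if_pos ⟨by omega, h23⟩]
      rfl
    · simp only [if_neg h23, pvIdx1 l1 l2 l3 (by omega)]
      rw [if_neg (show ¬(l1 < l3 ∧ l2 < l3) by omega)]
      rfl
  · simp only [if_neg h12]
    by_cases h13 : l1 < l3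
    · simp only [if_pos h13, pvIdx2 l1 l2 l3 (by omega) (by omega)]
      rw [if_pos ⟨h13, by omega⟩]
      rfl
    · simp only [if_neg h13, pvIdx0]
      rw [if_neg (show ¬(l1 < l3 ∧ l2 < l3) by omega)]
      rfl

theorem pvStepA_early (l1 l2 l3 : Int) (g1 : -1 ≤ l1) (g2 : -1 ≤ l2) (g3 : -1 ≤ l3) :
    (pvStepA (pvStepA (pvStepA (none, -1) (if l1 < 0 then none else some l1) "Dayman EU")
        (if l2 < 0 then none else some l2) "Dayman PH1")
        (if l3 < 0 then none else some l3) "Dayman PH2").1.getD "Dayman EU" =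
      if l1 < l3 ∧ l2 < l3 then "Dayman PH2" else if l1 < l2 then "Dayman PH1" else "Dayman EU" := by
  by_cases c1 : l1 < 0 <;> by_cases c2 : l2 < 0 <;> by_cases c3 : l3 < 0 <;>
    simp only [pvStepA, c1, c2, c3, if_true, if_false] <;>
    split_ifs <;> simp_all <;> omega

theorem pvNoneEq : (none : Option Int) = if (-1 : Int) < 0 then none else some (-1) := by
  norm_num

theorem pvFinal (o1 o2 o3 : Option Int) (l1 l2 l3 : Int)
    (g1 : -1 ≤ l1) (g2 : -1 ≤ l2) (g3 : -1 ≤ l3)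
    (e1 : o1 = if l1 < 0 then none else some l1)
    (e2 : o2 = if l2 < 0 then none else some l2)
    (e3 : o3 = if l3 < 0 then none else some l3) :
    ((pvStepA (pvStepA (pvStepA (none, -1) o1 "Dayman EU") o2 "Dayman PH1") o3 "Dayman PH2").1.getD
        "Dayman EU",
      if "Dayman PH2" =
          (pvStepA (pvStepA (pvStepA (none, -1) o1 "Dayman EU") o2 "Dayman PH1") o3
              "Dayman PH2").1.getD "Dayman EU" then
        "Dayman PH1"
      else "Dayman PH2") =
    (pvPick [l1, l2, l3],
      if pvPick [l1, l2, l3] = "Dayman PH2" then "Dayman PH1" else "Dayman PH2") := by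
  subst e1 e2 e3
  have hE := (pvStepA_early l1 l2 l3 g1 g2 g3).trans (pvPick_eq l1 l2 l3).symm
  rw [hE]
  by_cases h : pvPick [l1, l2, l3] = "Dayman PH2"
  · rw [if_pos h.symm, if_pos h]
  · rw [if_neg (fun hh => h hh.symm), if_neg h]

-- ===== VERDICT (by name: the statement is the Claim_ definition above) =====
theorem choose_continuous_night_workers_spec : Claim_equal_choose_continuous_night_workers := by
  intro prev _ hPre
  have h1 := hPre "Dayman EU" (by simp [pvDaymen])
  have h2 := hPre "Dayman PH1" (by simp [pvDaymen])
  have h3 := hPre "Dayman PH2" (by simp [pvDaymen])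
  unfold Spec_choose_continuous_night_workers
  unfold choose_continuous_night_workers choose_continuous_night_workers_alt
  simp only [pvDaymen, List.foldl, List.nil_append, List.cons_append]
  rcases hw1 : (PySem.Dict.mk prev).get? "Dayman EU" with _ | w1 <;>
    rcases hw2 : (PySem.Dict.mk prev).get? "Dayman PH1" with _ | w2 <;>
    rcases hw3 : (PySem.Dict.mk prev).get? "Dayman PH2" with _ | w3 <;>
    simp only [PySem.Dict.getD, hw1, hw2, hw3, Option.getD_some, Option.getD_none] at h1 h2 h3 ⊢
  case none.none.none =>
    rw [pvInner_default, pvLastTrue_nil]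
    exact pvFinal none none none (-1) (-1) (-1) le_rfl le_rfl le_rfl pvNoneEq pvNoneEq pvNoneEq
  case none.none.some =>
    rw [pvInner_default, pvInner_eq w3 h3, pvLastTrue_nil]
    exact pvFinal _ _ _ (-1) (-1) _ le_rfl le_rfl (pvLastTrue_ge w3) pvNoneEq pvNoneEq rfl
  case none.some.none =>
    rw [pvInner_default, pvInner_eq w2 h2, pvLastTrue_nil]
    exact pvFinal _ _ _ (-1) _ (-1) le_rfl (pvLastTrue_ge w2) le_rfl pvNoneEq rfl pvNoneEq
  case none.some.some =>
    rw [pvInner_default, pvInner_eq w2 h2, pvInner_eq w3 h3, pvLastTrue_nil]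
    exact pvFinal _ _ _ (-1) _ _ le_rfl (pvLastTrue_ge w2) (pvLastTrue_ge w3) pvNoneEq rfl rfl
  case some.none.none =>
    rw [pvInner_default, pvInner_eq w1 h1, pvLastTrue_nil]
    exact pvFinal _ _ _ _ (-1) (-1) (pvLastTrue_ge w1) le_rfl le_rfl rfl pvNoneEq pvNoneEq
  case some.none.some =>
    rw [pvInner_default, pvInner_eq w1 h1, pvInner_eq w3 h3, pvLastTrue_nil]
    exact pvFinal _ _ _ _ (-1) _ (pvLastTrue_ge w1) le_rfl (pvLastTrue_ge w3) rfl pvNoneEq rfl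
  case some.some.none =>
    rw [pvInner_default, pvInner_eq w1 h1, pvInner_eq w2 h2, pvLastTrue_nil]
    exact pvFinal _ _ _ _ _ (-1) (pvLastTrue_ge w1) (pvLastTrue_ge w2) le_rfl rfl rfl pvNoneEq
  case some.some.some =>
    rw [pvInner_eq w1 h1, pvInner_eq w2 h2, pvInner_eq w3 h3]
    exact pvFinal _ _ _ _ _ _ (pvLastTrue_ge w1) (pvLastTrue_ge w2) (pvLastTrue_ge w3) rfl rfl rfl
theorem choose_continuous_night_workers_raises : Claim_raises_choose_continuous_night_workers := by
  unfold Claim_raises_choose_continuous_night_workers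
  constructor
  · rintro prev _ ⟨dm, hdm, hlt⟩ hPre
    exact absurd (hPre dm hdm) (by omega)
  · exact ⟨by decide, by decide, by decide⟩

-- self-check of the crash-fix claim at its witness, read off choose_continuous_night_workers_raises
theorem pvRaiseWitness_checked_ok :
    Raises_choose_continuous_night_workers pvRaiseWitness_choose_continuous_night_workers ∧
      choose_continuous_night_workers_alt pvRaiseWitness_choose_continuous_night_workers =
        pvRaiseWitnessOut_choose_continuous_night_workers :=
  ⟨choose_continuous_night_workers_raises.2.2.1, choose_continuous_night_workers_raises.2.2.2⟩
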